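-- pv_equiv track=rewrite | github.com/MaxWarman/adventOfCode2022 | day2.py | getExpectedShape
-- ===== SOURCE A (Python) =====
-- def getExpectedShape(enemyPick, expectedResult):
--     # X - lose, Y - draw, Z - win
--     resultsDict = {
--             "A":[("X", "Z"), ("Y", "X"), ("Z", "Y")],
--             "B":[("X", "X"), ("Y", "Y"), ("Z", "Z")],
--             "C":[("X", "Y"), ("Y", "Z"), ("Z", "X")]
--         }
--
--     for result in resultsDict[enemyPick]:
--         if result[0] == expectedResult:
--             return result[1]
-- ===== SOURCE B (Python) =====
-- def getExpectedShape(enemyPick, expectedResult):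
--     # X - lose, Y - draw, Z - win; answer = enemy shape shifted by -1/0/+1 mod 3
--     e = {"A": 0, "B": 1, "C": 2}[enemyPick]
--     d = {"X": -1, "Y": 0, "Z": 1}.get(expectedResult)
--     if d is None:
--         return None
--     return "XYZ"[(e + d) % 3]
-- ===== Notes on version B (the rewrite author's own statement) =====
-- stated objective: simpler
-- what changed: Replaces the dict-of-pairs table scan with a closed-form modular shift: map enemy pick to 0/1/2, add -1/0/+1 for lose/draw/win, index 'XYZ' at the sum mod 3.
import Mathlib
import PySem

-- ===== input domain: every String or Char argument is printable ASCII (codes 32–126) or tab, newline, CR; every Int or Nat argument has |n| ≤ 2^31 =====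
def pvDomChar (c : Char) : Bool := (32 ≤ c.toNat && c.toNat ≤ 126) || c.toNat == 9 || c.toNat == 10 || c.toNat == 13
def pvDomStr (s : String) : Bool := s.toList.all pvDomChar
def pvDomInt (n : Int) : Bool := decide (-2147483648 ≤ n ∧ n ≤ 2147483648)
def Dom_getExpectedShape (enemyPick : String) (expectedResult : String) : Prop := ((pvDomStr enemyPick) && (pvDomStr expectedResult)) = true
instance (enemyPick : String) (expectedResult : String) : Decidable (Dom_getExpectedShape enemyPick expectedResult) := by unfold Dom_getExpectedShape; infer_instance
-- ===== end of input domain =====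

-- B replaces A's dict-of-pairs table scan with a closed-form modular shift (simpler, same O(1) cost).


-- ===== PORT A =====
-- loop over resultsDict[enemyPick]: first pair whose .1 equals expectedResult; fall through → None
def pvScanA (rows : List (String × String)) (expectedResult : String) : Option String :=
  match rows with
  | [] => none
  | result :: rest =>
      if result.1 == expectedResult then some result.2 else pvScanA rest expectedResult

def getExpectedShape (enemyPick : String) (expectedResult : String) : Option String :=
  let resultsDict : PySem.Dict String (List (String × String)) :=
    PySem.Dict.ofList [("A", [("X", "Z"), ("Y", "X"), ("Z", "Y")]),
     ("B", [("X", "X"), ("Y", "Y"), ("Z", "Z")]),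
     ("C", [("X", "Y"), ("Y", "Z"), ("Z", "X")])]
  match PySem.Dict.get? resultsDict enemyPick with
  | none => none   -- Python raises KeyError here; excluded by Pre_
  | some rows => pvScanA rows expectedResult

-- ===== PORT B =====
def getExpectedShape_alt (enemyPick : String) (expectedResult : String) : Option String :=
  let eDict : PySem.Dict String Int := PySem.Dict.ofList [("A", 0), ("B", 1), ("C", 2)]
  match PySem.Dict.get? eDict enemyPick with
  | none => none   -- Python raises KeyError here; excluded by Pre_
  | some e =>
      let dDict : PySem.Dict String Int := PySem.Dict.ofList [("X", -1), ("Y", 0), ("Z", 1)]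
      match PySem.Dict.get? dDict expectedResult with
      | none => none
      | some d => (PySem.Str.pyGet? "XYZ" (PySem.Int.mod (e + d) 3)).map (fun c => String.ofList [c])

-- ===== PRECONDITION & SPEC =====
-- Pre_ excludes exactly the enemyPick values outside {"A","B","C"}, on which Python A raises KeyError.
def Pre_getExpectedShape (enemyPick : String) (expectedResult : String) : Prop :=
  enemyPick = "A" ∨ enemyPick = "B" ∨ enemyPick = "C"
instance (enemyPick : String) (expectedResult : String) : Decidable (Pre_getExpectedShape enemyPick expectedResult) := by unfold Pre_getExpectedShape; infer_instance
def pvWitness_getExpectedShape : String × String := ("A", "Y")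

def Spec_getExpectedShape (enemyPick : String) (expectedResult : String) (out : Option String) : Prop := out = getExpectedShape_alt enemyPick expectedResult
instance (enemyPick : String) (expectedResult : String) (out : Option String) : Decidable (Spec_getExpectedShape enemyPick expectedResult out) := by unfold Spec_getExpectedShape; infer_instance

-- ===== CLAIM (what is proved, stated in full; the proofs are below) =====
def Claim_equal_getExpectedShape : Prop := ∀ (enemyPick : String) (expectedResult : String), Dom_getExpectedShape enemyPick expectedResult → Pre_getExpectedShape enemyPick expectedResult → Spec_getExpectedShape enemyPick expectedResult (getExpectedShape enemyPick expectedResult)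

-- ===== LEMMAS AND PROOFS =====
theorem agree_fixed_enemy (enemyPick expectedResult : String)
    (hp : enemyPick = "A" ∨ enemyPick = "B" ∨ enemyPick = "C") :
    getExpectedShape enemyPick expectedResult = getExpectedShape_alt enemyPick expectedResult := by
  by_cases hx : expectedResult = "X"
  · rcases hp with h | h | h <;> subst h <;> subst hx <;> rfl
  · by_cases hy : expectedResult = "Y"
    · rcases hp with h | h | h <;> subst h <;> subst hy <;> rfl
    · by_cases hz : expectedResult = "Z"
      · rcases hp with h | h | h <;> subst h <;> subst hz <;> rfl
      · -- expectedResult matches no table key: both return none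
        have hx' : ("X" = expectedResult) = False := by simp; exact fun h => hx h.symm
        have hy' : ("Y" = expectedResult) = False := by simp; exact fun h => hy h.symm
        have hz' : ("Z" = expectedResult) = False := by simp; exact fun h => hz h.symm
        have hA : getExpectedShape enemyPick expectedResult = none := by
          have hd : PySem.Dict.ofList
              [("A", [("X", "Z"), ("Y", "X"), ("Z", "Y")]),
               ("B", [("X", "X"), ("Y", "Y"), ("Z", "Z")]),
               ("C", [("X", "Y"), ("Y", "Z"), ("Z", "X")])] = PySem.Dict.mk
              [("A", [("X", "Z"), ("Y", "X"), ("Z", "Y")]),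
               ("B", [("X", "X"), ("Y", "Y"), ("Z", "Z")]),
               ("C", [("X", "Y"), ("Y", "Z"), ("Z", "X")])] := by decide
          rcases hp with h | h | h <;> subst h <;>
            simp [getExpectedShape, hd, PySem.Dict.get?_mk_cons, pvScanA,
                  beq_iff_eq, hx', hy', hz']
        have hB : getExpectedShape_alt enemyPick expectedResult = none := by
          have hd : PySem.Dict.ofList [("X", (-1 : Int)), ("Y", 0), ("Z", 1)]
              = PySem.Dict.mk [("X", (-1 : Int)), ("Y", 0), ("Z", 1)] := by decide
          have he : PySem.Dict.ofList [("A", (0 : Int)), ("B", 1), ("C", 2)]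
              = PySem.Dict.mk [("A", (0 : Int)), ("B", 1), ("C", 2)] := by decide
          rcases hp with h | h | h <;> subst h <;>
            simp [getExpectedShape_alt, hd, he, PySem.Dict.get?_mk_cons, PySem.Dict.get?,
                  beq_iff_eq, hx', hy', hz']
        rw [hA, hB]

-- ===== VERDICT (by name: the statement is the Claim_ definition above) =====
theorem getExpectedShape_spec : Claim_equal_getExpectedShape := by
  intro e r _ hp
  unfold Spec_getExpectedShape
  exact agree_fixed_enemy e r hp
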